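-- pv_equiv track=rewrite | github.com/swtsr-sanity/yf_toolbox_blender | rigging.py | remove_shorter_keys
-- ===== SOURCE A (Python) =====
-- def remove_shorter_keys(d):
--     # Sort keys by length in descending order
--     sorted_keys = sorted(d, key=len, reverse=True)
--     unique_dict = {}
--
--     for key in sorted_keys:
--         value = d[key]
--         # Add the key-value pair to unique_dict if the value is not already in unique_dict
--         if value not in unique_dict.values():
--             unique_dict[key] = value
--
--     return unique_dict
-- ===== SOURCE B (Python) =====
-- def remove_shorter_keys(d):
--     # Group by value in ONE pass over the unsorted dict, keeping per value the
--     # longest key seen so far (ties: the earlier one); then sort only the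
--     # winners -- one per distinct value -- into length-descending order.
--     best = {}
--     for i, (key, value) in enumerate(d.items()):
--         cur = best.get(value)
--         if cur is None or len(cur[1]) < len(key):
--             best[value] = (i, key)
--     winners = sorted(best.values(), key=lambda ik: (-len(ik[1]), ik[0]))
--     return {key: d[key] for i, key in winners}
-- ===== Notes on version B (the rewrite author's own statement) =====
-- stated objective: faster
-- what changed: A first sorts all keys by length and then, per key, rescans unique_dict.values() (quadratic); B never pre-sorts the keys: one grouping pass over the unsorted dict keeps, per value, its longest (earliest on ties) key, and only the winners - one per distinct value - are then sorted into the output order.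
import Mathlib
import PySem

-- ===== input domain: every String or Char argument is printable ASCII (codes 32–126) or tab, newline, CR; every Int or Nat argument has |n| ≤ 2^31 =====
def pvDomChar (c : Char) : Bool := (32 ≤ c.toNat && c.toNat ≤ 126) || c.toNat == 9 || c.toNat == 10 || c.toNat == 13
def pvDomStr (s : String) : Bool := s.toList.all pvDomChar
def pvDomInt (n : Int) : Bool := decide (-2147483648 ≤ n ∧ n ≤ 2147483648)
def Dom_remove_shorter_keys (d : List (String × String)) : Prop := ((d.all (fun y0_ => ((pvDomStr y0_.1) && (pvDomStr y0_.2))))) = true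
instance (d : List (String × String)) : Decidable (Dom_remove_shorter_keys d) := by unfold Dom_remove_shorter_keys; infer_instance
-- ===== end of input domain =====

-- B drops A's pre-sort of all keys and its per-key scan of unique_dict.values(): one grouping
-- pass elects each value's longest (earliest on ties) key, then only the winners are sorted
-- (objective: faster).


-- ===== PORT A =====
def remove_shorter_keys (d : List (String × String)) : List (String × String) :=
  let sorted_keys := PySem.List.sorted (d.map Prod.fst) (fun k => PySem.Str.len k) true
  (sorted_keys.foldl
    (fun unique_dict key =>
      let value := ((PySem.Dict.mk d).get? key).getD ""
      if (PySem.Dict.values unique_dict).contains value then unique_dict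
      else unique_dict.insert key value)
    PySem.Dict.empty).items

-- ===== PORT B =====
def remove_shorter_keys_alt (d : List (String × String)) : List (String × String) :=
  let best := (PySem.List.enumerate d).foldl
    (fun (b : PySem.Dict String (Int × String)) p =>
      match b.get? p.2.2 with
      | none => b.insert p.2.2 (p.1, p.2.1)
      | some cur =>
        if PySem.Str.len cur.2 < PySem.Str.len p.2.1 then b.insert p.2.2 (p.1, p.2.1) else b)
    PySem.Dict.empty
  let winners := PySem.List.sorted2 (PySem.Dict.values best)
      (fun ik => -(PySem.Str.len ik.2)) (fun ik => ik.1) false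
  (winners.foldl
    (fun out ik => out.insert ik.2 (((PySem.Dict.mk d).get? ik.2).getD ""))
    PySem.Dict.empty).items

-- ===== PRECONDITION & SPEC =====
-- Pre_ excludes association lists with duplicate keys: the argument is a Python dict, which
-- cannot contain duplicate keys, so such lists encode no actual Python input.
def Pre_remove_shorter_keys (d : List (String × String)) : Prop :=
  (d.map Prod.fst).Nodup
instance (d : List (String × String)) : Decidable (Pre_remove_shorter_keys d) := by
  unfold Pre_remove_shorter_keys; infer_instance

def pvWitness_remove_shorter_keys : (List (String × String)) := [("ab", "x"), ("c", "x")]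

def Spec_remove_shorter_keys (d : List (String × String)) (out : List (String × String)) : Prop := out = remove_shorter_keys_alt d
instance (d : List (String × String)) (out : List (String × String)) : Decidable (Spec_remove_shorter_keys d out) := by unfold Spec_remove_shorter_keys; infer_instance

-- ===== CLAIM (what is proved, stated in full; the proofs are below) =====
def Claim_equal_remove_shorter_keys : Prop := ∀ (d : List (String × String)), Dom_remove_shorter_keys d → Pre_remove_shorter_keys d → Spec_remove_shorter_keys d (remove_shorter_keys d)

-- ===== LEMMAS AND PROOFS =====

-- the pairs A keeps out of a processed key list P: each key that is the FIRST in P with its value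
def pvKeep (vf : String → String) (P : List String) : List (String × String) :=
  (P.filter (fun k => P.find? (fun k' => vf k' == vf k) == some k)).map (fun k => (k, vf k))

-- the strict "A-output order" on keys: longer first, ties by position in the key list
def pvQ (keys : List String) (a b : String) : Prop :=
  PySem.Str.len b < PySem.Str.len a ∨
    (PySem.Str.len a = PySem.Str.len b ∧ keys.idxOf a < keys.idxOf b)

-- inserting a key absent from the item list appends
theorem pv_insert_fresh (l : List (String × String)) (k v : String)
    (h : ∀ p ∈ l, p.1 ≠ k) :
    (PySem.Dict.mk l).insert k v = PySem.Dict.mk (l ++ [(k, v)]) := by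
  have hc : (PySem.Dict.mk l).contains k = false := by
    simp [PySem.Dict.contains]
    intro a b hab
    exact h (a, b) hab
  simp [PySem.Dict.insert, hc]

-- value membership in A's kept pairs = some processed key has that value
theorem pv_keep_values (vf : String → String) (P : List String) (x : String) :
    ((PySem.Dict.values (PySem.Dict.mk (pvKeep vf P))).contains x = true)
      ↔ ∃ k' ∈ P, vf k' = x := by
  simp only [pvKeep, PySem.Dict.values, List.map_map, List.contains_eq_mem,
    decide_eq_true_eq, List.mem_map, Function.comp, List.mem_filter]
  constructor
  · rintro ⟨k', ⟨hk'P, _⟩, hval⟩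
    exact ⟨k', hk'P, hval⟩
  · rintro ⟨k', hk'P, hval⟩
    have hs : (P.find? (fun a => vf a == vf k')).isSome := by
      rw [List.find?_isSome]
      exact ⟨k', hk'P, by simp⟩
    obtain ⟨k₀, hk₀⟩ := Option.isSome_iff_exists.mp hs
    have hk₀P : k₀ ∈ P := List.mem_of_find?_eq_some hk₀
    have hk₀v : vf k₀ = vf k' := by
      have := List.find?_some hk₀; simpa using this
    refine ⟨k₀, ⟨hk₀P, ?_⟩, by rw [hk₀v, hval]⟩
    have : (fun a => vf a == vf k₀) = (fun a => vf a == vf k') := by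
      funext a; rw [hk₀v]
    rw [this, hk₀]
    simp

-- A's loop body turns "kept pairs of P" into "kept pairs of P ++ [k]"
theorem pv_step (vf : String → String) (P : List String) (k : String) (hk : k ∉ P) :
    (if (PySem.Dict.values (PySem.Dict.mk (pvKeep vf P))).contains (vf k)
     then PySem.Dict.mk (pvKeep vf P)
     else (PySem.Dict.mk (pvKeep vf P)).insert k (vf k))
      = PySem.Dict.mk (pvKeep vf (P ++ [k])) := by
  have hcongr : ∀ x ∈ P,
      ((P ++ [k]).find? (fun k' => vf k' == vf x) == some x)
        = (P.find? (fun k' => vf k' == vf x) == some x) := by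
    intro x hx
    have hs : (P.find? (fun a => vf a == vf x)).isSome := by
      rw [List.find?_isSome]; exact ⟨x, hx, by simp⟩
    obtain ⟨k₀, hk₀⟩ := Option.isSome_iff_exists.mp hs
    rw [List.find?_append, hk₀]
    rfl
  have hfilterP : (P ++ [k]).filter (fun x => (P ++ [k]).find? (fun k' => vf k' == vf x) == some x)
      = P.filter (fun x => P.find? (fun k' => vf k' == vf x) == some x)
        ++ [k].filter (fun x => (P ++ [k]).find? (fun k' => vf k' == vf x) == some x) := by
    rw [List.filter_append, List.filter_congr hcongr]
  by_cases hex : ∃ k' ∈ P, vf k' = vf k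
  · rw [if_pos ((pv_keep_values vf P (vf k)).mpr hex)]
    unfold pvKeep
    rw [hfilterP]
    simp
    refine ⟨fun hfk => hk (List.mem_of_find?_eq_some hfk), hex⟩
  · rw [if_neg (by simpa using (not_iff_not.mpr (pv_keep_values vf P (vf k))).mpr hex)]
    have hnone : P.find? (fun a => vf a == vf k) = none := by
      rw [List.find?_eq_none]
      intro x hx
      simp only [beq_iff_eq]
      exact fun hvx => hex ⟨x, hx, hvx⟩
    have hfresh : ∀ p ∈ pvKeep vf P, p.1 ≠ k := by
      intro p hp
      simp only [pvKeep, List.mem_map, List.mem_filter] at hp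
      obtain ⟨k', ⟨hk'P, _⟩, hpk⟩ := hp
      rw [← hpk]
      intro hkk'; exact hk (hkk' ▸ hk'P)
    rw [pv_insert_fresh _ _ _ hfresh]
    unfold pvKeep
    rw [hfilterP]
    simp [hnone]

-- A's whole loop computes the kept pairs of the processed list
theorem pv_A_char (vf : String → String) :
    ∀ (rest P : List String), (P ++ rest).Nodup →
    List.foldl
      (fun ud key =>
        if (PySem.Dict.values ud).contains (vf key) then ud else ud.insert key (vf key))
      (PySem.Dict.mk (pvKeep vf P)) rest
      = PySem.Dict.mk (pvKeep vf (P ++ rest)) := by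
  intro rest
  induction rest with
  | nil => intro P _; simp
  | cons k rest ih =>
    intro P h
    have hk : k ∉ P := by
      have h' := List.nodup_middle.mp h
      have := h'.notMem
      simp only [List.mem_append] at this
      exact fun hkP => this (Or.inl hkP)
    rw [List.foldl_cons, pv_step vf P k hk, ih (P ++ [k]) (by simpa using h),
      List.append_assoc, List.singleton_append]

-- insertBy preserves a transitive pairwise order when the test agrees with it
theorem pv_insertBy_pairwise {α : Type} (P : α → α → Bool) (Q : α → α → Prop)
    (ht : ∀ a b c, Q a b → Q b c → Q a c) (x : α) (ys : List α)
    (hx : ∀ y ∈ ys, (P x y = true → Q x y) ∧ (P x y = false → Q y x))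
    (hys : ys.Pairwise Q) : (PySem.List.insertBy P x ys).Pairwise Q := by
  induction ys with
  | nil => simp [PySem.List.insertBy]
  | cons y t ih =>
    rcases List.pairwise_cons.mp hys with ⟨hyt, htp⟩
    by_cases hP : P x y = true
    · rw [show PySem.List.insertBy P x (y :: t) = x :: y :: t from by
        simp [PySem.List.insertBy, hP]]
      refine List.pairwise_cons.mpr ⟨?_, hys⟩
      intro z hz
      rcases List.mem_cons.mp hz with rfl | hzt
      · exact (hx z (by simp)).1 hP
      · exact ht _ _ _ ((hx y (by simp)).1 hP) (hyt z hzt)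
    · rw [show PySem.List.insertBy P x (y :: t) = y :: PySem.List.insertBy P x t from by
        simp [PySem.List.insertBy, hP]]
      refine List.pairwise_cons.mpr
        ⟨?_, ih (fun z hz => hx z (by simp [hz])) htp⟩
      intro z hz
      rcases (PySem.List.mem_insertBy P x z t).mp hz with rfl | hzt
      · exact (hx y (by simp)).2 (by simpa using hP)
      · exact hyt z hzt

-- an insertion-sort fold produces a Q-pairwise list
theorem pv_foldl_insertBy_pairwise {α : Type} (P : α → α → Bool) (Q : α → α → Prop)
    (ht : ∀ a b c, Q a b → Q b c → Q a c) :
    ∀ (l acc : List α), acc.Pairwise Q →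
      (∀ x ∈ l, ∀ y ∈ acc, (P x y = true → Q x y) ∧ (P x y = false → Q y x)) →
      l.Pairwise (fun a b => (P b a = true → Q b a) ∧ (P b a = false → Q a b)) →
      (l.foldl (fun acc x => PySem.List.insertBy P x acc) acc).Pairwise Q := by
  intro l
  induction l with
  | nil => intro acc hacc _ _; simpa using hacc
  | cons x t ih =>
    intro acc hacc hcomp hl
    rcases List.pairwise_cons.mp hl with ⟨hxt, htp⟩
    rw [List.foldl_cons]
    refine ih _ (pv_insertBy_pairwise P Q ht x acc (fun y hy => hcomp x (by simp) y hy) hacc)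
      ?_ htp
    intro z hz y hy
    rcases (PySem.List.mem_insertBy P x y acc).mp hy with rfl | hya
    · exact hxt z hz
    · exact hcomp z (by simp [hz]) y hya

-- a Nodup list is strictly increasing in idxOf
theorem pv_pairwise_idxOf {α : Type} [DecidableEq α] (l : List α) (h : l.Nodup) :
    l.Pairwise (fun a b => l.idxOf a < l.idxOf b) := by
  rw [List.pairwise_iff_getElem]
  intro i j hi hj hij
  rw [List.Nodup.idxOf_getElem h i hi, List.Nodup.idxOf_getElem h j hj]
  exact hij

-- pvQ is transitive
theorem pv_Q_trans (keys : List String) (a b c : String) :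
    pvQ keys a b → pvQ keys b c → pvQ keys a c := by
  unfold pvQ
  omega

-- pvQ is asymmetric
theorem pv_Q_asymm (keys : List String) (a b : String) :
    pvQ keys a b → pvQ keys b a → False := by
  unfold pvQ
  omega

-- A's sorted key list is pvQ-pairwise (stability of the length sort)
theorem pv_S_pairwise (keys : List String) (h : keys.Nodup) :
    (PySem.List.sorted keys (fun k => PySem.Str.len k) true).Pairwise (pvQ keys) := by
  rw [PySem.List.sorted_rev_eq_foldl_insertBy]
  refine pv_foldl_insertBy_pairwise _ _ (fun a b c => pv_Q_trans keys a b c) keys []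
    (by simp) (by simp) ?_
  refine (pv_pairwise_idxOf keys h).imp ?_
  intro a b hidx
  constructor
  · intro hP
    exact Or.inl (by simpa using hP)
  · intro hP
    have : ¬ (PySem.Str.len a < PySem.Str.len b) := by simpa using hP
    unfold pvQ
    omega

-- the single-value projection of B's grouping loop
def pvStep (v : String) (acc : Option (Int × String)) (p : Int × (String × String)) :
    Option (Int × String) :=
  if p.2.2 = v then
    (match acc with
     | none => some (p.1, p.2.1)
     | some c => if PySem.Str.len c.2 < PySem.Str.len p.2.1 then some (p.1, p.2.1) else acc)
  else acc

-- B's dict fold projected at one value is pvStep folded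
theorem pv_run_get (l : List (Int × (String × String)))
    (b : PySem.Dict String (Int × String)) (v : String) :
    ((l.foldl
        (fun (b : PySem.Dict String (Int × String)) p =>
          match b.get? p.2.2 with
          | none => b.insert p.2.2 (p.1, p.2.1)
          | some cur =>
            if PySem.Str.len cur.2 < PySem.Str.len p.2.1 then b.insert p.2.2 (p.1, p.2.1) else b)
        b).get? v)
      = l.foldl (pvStep v) (b.get? v) := by
  induction l generalizing b with
  | nil => simp
  | cons p t ih =>
    rw [List.foldl_cons, List.foldl_cons, ih]
    congr 1
    by_cases hv : p.2.2 = v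
    · subst hv
      rcases hb : b.get? p.2.2 with _ | c
      · dsimp only
        simp only [pvStep]
        exact PySem.Dict.get?_insert_self _ _ _
      · dsimp only
        simp only [pvStep]
        by_cases hlt : PySem.Str.len c.2 < PySem.Str.len p.2.1
        · rw [if_pos hlt, if_pos hlt]
          exact PySem.Dict.get?_insert_self _ _ _
        · rw [if_neg hlt, if_neg hlt]
          exact hb
    · have hne : v ≠ p.2.2 := fun h => hv h.symm
      rcases hb : b.get? p.2.2 with _ | c
      · dsimp only
        simp only [pvStep, if_neg hv]
        exact PySem.Dict.get?_insert_of_ne _ _ hne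
      · dsimp only
        simp only [pvStep, if_neg hv]
        by_cases hlt : PySem.Str.len c.2 < PySem.Str.len p.2.1
        · rw [if_pos hlt]
          exact PySem.Dict.get?_insert_of_ne _ _ hne
        · rw [if_neg hlt]

-- what the projected fold computes: the longest-key, earliest-on-ties entry of value v
theorem pv_run_spec (v : String) :
    ∀ (l : List (Int × (String × String))), l.Pairwise (fun p q => p.1 < q.1) →
      (l.foldl (pvStep v) none = none → ∀ p ∈ l, p.2.2 ≠ v) ∧
      (∀ i k, l.foldl (pvStep v) none = some (i, k) →
        (i, (k, v)) ∈ l ∧ ∀ p ∈ l, p.2.2 = v →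
          (PySem.Str.len p.2.1 < PySem.Str.len k ∨
           (PySem.Str.len p.2.1 = PySem.Str.len k ∧ i ≤ p.1))) := by
  intro l
  induction l using List.reverseRecOn with
  | nil => exact fun _ => ⟨fun _ p hp => absurd hp (by simp), fun i k h => by simp at h⟩
  | append_singleton t q ih =>
    intro hpw
    rcases List.pairwise_append.mp hpw with ⟨hpt, -, hlast⟩
    have hql : ∀ p ∈ t, p.1 < q.1 := fun p hp => hlast p hp q (by simp)
    have iht := ih hpt
    have hfold : (t ++ [q]).foldl (pvStep v) none = pvStep v (t.foldl (pvStep v) none) q := by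
      rw [List.foldl_append]; rfl
    by_cases hv : q.2.2 = v
    · rcases hr : t.foldl (pvStep v) none with _ | ik
      · have hres : (t ++ [q]).foldl (pvStep v) none = some (q.1, q.2.1) := by
          rw [hfold, hr]
          simp only [pvStep, if_pos hv]
        constructor
        · intro h; rw [hres] at h; exact absurd h (by simp)
        · intro i k h
          rw [hres] at h
          have hi : q.1 = i := congrArg Prod.fst (Option.some.inj h)
          have hk : q.2.1 = k := congrArg Prod.snd (Option.some.inj h)
          constructor
          · rw [← hi, ← hk, ← hv]
            exact List.mem_append.mpr (Or.inr (by simp))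
          · intro p hp hpv
            rcases List.mem_append.mp hp with hp | hp
            · exact absurd hpv (iht.1 hr p hp)
            · simp only [List.mem_singleton] at hp
              subst hp
              exact Or.inr ⟨by rw [hk], by rw [hi]⟩
      · obtain ⟨hmem, hopt⟩ := iht.2 ik.1 ik.2 (by rw [hr])
        by_cases hlt : PySem.Str.len ik.2 < PySem.Str.len q.2.1
        · have hres : (t ++ [q]).foldl (pvStep v) none = some (q.1, q.2.1) := by
            rw [hfold, hr]
            simp only [pvStep, if_pos hv]
            rw [if_pos hlt]
          constructor
          · intro h; rw [hres] at h; exact absurd h (by simp)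
          · intro i k h
            rw [hres] at h
            have hi : q.1 = i := congrArg Prod.fst (Option.some.inj h)
            have hk : q.2.1 = k := congrArg Prod.snd (Option.some.inj h)
            constructor
            · rw [← hi, ← hk, ← hv]
              exact List.mem_append.mpr (Or.inr (by simp))
            · intro p hp hpv
              rcases List.mem_append.mp hp with hp | hp
              · have := hopt p hp hpv
                rw [← hk]
                left
                omega
              · simp only [List.mem_singleton] at hp
                subst hp
                exact Or.inr ⟨by rw [hk], by rw [hi]⟩
        · have hres : (t ++ [q]).foldl (pvStep v) none = some ik := by
            rw [hfold, hr]
            simp only [pvStep, if_pos hv]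
            rw [if_neg hlt]
          constructor
          · intro h; rw [hres] at h; exact absurd h (by simp)
          · intro i k h
            rw [hres] at h
            have hik : ik = (i, k) := Option.some.inj h
            subst hik
            refine ⟨List.mem_append.mpr (Or.inl hmem), ?_⟩
            intro p hp hpv
            rcases List.mem_append.mp hp with hp | hp
            · exact hopt p hp hpv
            · simp only [List.mem_singleton] at hp
              subst hp
              have hlt2 : i < p.1 := hql (i, (k, v)) hmem
              simp only at hlt
              omega
    · have hres : (t ++ [q]).foldl (pvStep v) none = t.foldl (pvStep v) none := by
        rw [hfold]
        simp only [pvStep, if_neg hv]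
      constructor
      · intro h p hp
        rw [hres] at h
        rcases List.mem_append.mp hp with hp | hp
        · exact iht.1 h p hp
        · simp only [List.mem_singleton] at hp; subst hp; exact hv
      · intro i k h
        rw [hres] at h
        obtain ⟨hmem, hopt⟩ := iht.2 i k h
        refine ⟨List.mem_append.mpr (Or.inl hmem), ?_⟩
        intro p hp hpv
        rcases List.mem_append.mp hp with hp | hp
        · exact hopt p hp hpv
        · simp only [List.mem_singleton] at hp; subst hp; exact absurd hpv hv

-- B's grouping fold keeps its keys Nodup
theorem pv_best_keys_nodup (l : List (Int × (String × String)))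
    (b : PySem.Dict String (Int × String)) (h : b.keys.Nodup) :
    ((l.foldl
        (fun (b : PySem.Dict String (Int × String)) p =>
          match b.get? p.2.2 with
          | none => b.insert p.2.2 (p.1, p.2.1)
          | some cur =>
            if PySem.Str.len cur.2 < PySem.Str.len p.2.1 then b.insert p.2.2 (p.1, p.2.1) else b)
        b).keys).Nodup := by
  induction l generalizing b with
  | nil => simpa using h
  | cons p t ih =>
    rw [List.foldl_cons]
    rcases hb : b.get? p.2.2 with _ | c
    · exact ih _ (PySem.Dict.nodup_keys_insert _ _ _ h)
    · dsimp only
      by_cases hlt : PySem.Str.len c.2 < PySem.Str.len p.2.1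
      · rw [if_pos hlt]
        exact ih _ (PySem.Dict.nodup_keys_insert _ _ _ h)
      · rw [if_neg hlt]
        exact ih _ h

-- find? on a Q-pairwise list returns the Q-least matching element
theorem pv_find_eq {α : Type} (S : List α) (Q : α → α → Prop)
    (hasym : ∀ a b, Q a b → Q b a → False)
    (hpw : S.Pairwise Q) (p : α → Bool) (k : α) (hk : k ∈ S) (hpk : p k = true)
    (hopt : ∀ k' ∈ S, p k' = true → k' = k ∨ Q k k') : S.find? p = some k := by
  induction S with
  | nil => simp at hk
  | cons x t ih =>
    rcases List.pairwise_cons.mp hpw with ⟨hxt, htp⟩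
    by_cases hx : p x = true
    · rcases hopt x (by simp) hx with rfl | hQ
      · exact List.find?_cons_of_pos hx
      · rcases List.mem_cons.mp hk with rfl | hkt
        · exact List.find?_cons_of_pos hx
        · exact absurd (hxt k hkt) (fun h => hasym _ _ hQ h)
    · have hkt : k ∈ t := by
        rcases List.mem_cons.mp hk with rfl | hkt
        · exact absurd hpk (by simpa using hx)
        · exact hkt
      rw [List.find?_cons_of_neg hx]
      exact ih htp hkt (fun k' hk' hp' => hopt k' (by simp [hk']) hp')

-- ===== VERDICT (by name: the statement is the Claim_ definition above) =====
theorem remove_shorter_keys_spec : Claim_equal_remove_shorter_keys := by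
  intro d _ hpre
  unfold Spec_remove_shorter_keys remove_shorter_keys remove_shorter_keys_alt
  dsimp only
  have hS : (PySem.List.sorted (d.map Prod.fst) (fun k => PySem.Str.len k) true).Nodup :=
    ((PySem.List.sorted_perm (d.map Prod.fst) (fun k => PySem.Str.len k) true).nodup_iff).mpr hpre
  have hA := pv_A_char (fun key => ((PySem.Dict.mk d).get? key).getD "")
      (PySem.List.sorted (d.map Prod.fst) (fun k => PySem.Str.len k) true) [] (by simpa using hS)
  rw [List.nil_append] at hA
  rw [show PySem.Dict.mk (pvKeep (fun key => ((PySem.Dict.mk d).get? key).getD "") [])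
        = (PySem.Dict.empty : PySem.Dict String String) from rfl] at hA
  rw [hA]
  -- B-side abbreviations
  set best := (PySem.List.enumerate d).foldl
      (fun (b : PySem.Dict String (Int × String)) p =>
        match b.get? p.2.2 with
        | none => b.insert p.2.2 (p.1, p.2.1)
        | some cur =>
          if PySem.Str.len cur.2 < PySem.Str.len p.2.1 then b.insert p.2.2 (p.1, p.2.1) else b)
      PySem.Dict.empty with hbest
  set winners := PySem.List.sorted2 (PySem.Dict.values best)
      (fun ik => -(PySem.Str.len ik.2)) (fun ik => ik.1) false with hwin
  -- shared facts
  have hget : ∀ v, best.get? v = (PySem.List.enumerate d).foldl (pvStep v) none := by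
    intro v
    rw [hbest, pv_run_get, PySem.Dict.get?_empty]
  have hkeysnd : best.keys.Nodup := by
    rw [hbest]
    exact pv_best_keys_nodup _ _ (by simp)
  have hval_of_mem : ∀ k w : String, (k, w) ∈ d → ((PySem.Dict.mk d).get? k).getD "" = w := by
    intro k w hkw
    have h1 : (PySem.Dict.mk d).get? k = some w :=
      PySem.Dict.get?_of_mem_items (d := PySem.Dict.mk d) hkw (by simpa using hpre)
    rw [h1]; rfl
  have hidx_at : ∀ (j : Nat) (hj : j < d.length), (d.map Prod.fst).idxOf (d[j].1) = j := by
    intro j hj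
    have h1 : (d.map Prod.fst)[j]'(by simpa using hj) = d[j].1 := by simp
    rw [← h1]
    exact List.Nodup.idxOf_getElem hpre j _
  have hmem_enum : ∀ (k w : String), (k, w) ∈ d →
      ((((d.map Prod.fst).idxOf k : Nat) : Int), (k, w)) ∈ PySem.List.enumerate d := by
    intro k w hkw
    obtain ⟨j, hj, hdj⟩ := List.mem_iff_getElem.mp hkw
    have hidx : (d.map Prod.fst).idxOf k = j := by
      rw [show k = d[j].1 from by rw [hdj]]
      exact hidx_at j hj
    rw [hidx, PySem.List.mem_enumerate_iff]
    exact ⟨j, hj, by rw [hdj]; simp⟩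
  have hinj : ∀ x y : String, x ∈ d.map Prod.fst → y ∈ d.map Prod.fst →
      (d.map Prod.fst).idxOf x = (d.map Prod.fst).idxOf y → x = y := by
    intro x y hx hy he
    have h1 := List.getElem_idxOf (List.idxOf_lt_length_of_mem hx)
    have h2 := List.getElem_idxOf (List.idxOf_lt_length_of_mem hy)
    simp only [he] at h1
    exact h1.symm.trans h2
  -- what a successful lookup in best means
  have hBA : ∀ v i k, best.get? v = some (i, k) →
      (k, v) ∈ d ∧ ((PySem.Dict.mk d).get? k).getD "" = v ∧
        i = (((d.map Prod.fst).idxOf k : Nat) : Int) ∧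
        ∀ k' ∈ d.map Prod.fst, ((PySem.Dict.mk d).get? k').getD "" = v →
          k' = k ∨ pvQ (d.map Prod.fst) k k' := by
    intro v i k h
    rw [hget v] at h
    obtain ⟨hmem, hopt⟩ :=
      (pv_run_spec v (PySem.List.enumerate d) (PySem.List.pairwise_lt_enumerate d 0)).2 i k h
    obtain ⟨j, hj, hpj⟩ := (PySem.List.mem_enumerate_iff d 0 _).mp hmem
    have hi : i = (j : Int) := by
      have := congrArg Prod.fst hpj
      simpa using this
    have hdj : d[j] = (k, v) := by
      have := congrArg Prod.snd hpj
      simpa using this.symm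
    have hkd : (k, v) ∈ d := by
      rw [← hdj]
      exact List.getElem_mem hj
    have hidxk : (d.map Prod.fst).idxOf k = j := by
      rw [show k = d[j].1 from by rw [hdj]]
      exact hidx_at j hj
    refine ⟨hkd, hval_of_mem k v hkd, by rw [hidxk, hi], ?_⟩
    intro k' hk' hvk'
    by_cases hkk : k' = k
    · exact Or.inl hkk
    · right
      obtain ⟨⟨k'', w'⟩, hk'd, hfst⟩ := List.mem_map.mp hk'
      have hk'' : k'' = k' := hfst
      subst hk''
      have hw' : w' = v := by
        rw [← hval_of_mem k'' w' hk'd]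
        exact hvk'
      rw [hw'] at hk'd
      have hin := hmem_enum k'' v hk'd
      have hor := hopt _ hin rfl
      unfold pvQ
      have hne_idx : (d.map Prod.fst).idxOf k ≠ (d.map Prod.fst).idxOf k'' := by
        intro he
        exact hkk (hinj k'' k hk'
          (List.mem_map.mpr ⟨(k, v), hkd, rfl⟩) he.symm)
      simp only at hor
      rw [hi, ← hidxk] at hor
      omega
  -- the winner of value v is the key A's find? picks
  have hfind : ∀ v i k, best.get? v = some (i, k) →
      (PySem.List.sorted (d.map Prod.fst) (fun k => PySem.Str.len k) true).find?
          (fun k' => ((PySem.Dict.mk d).get? k').getD "" == v) = some k := by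
    intro v i k h
    obtain ⟨hkd, hvfk, -, hopt⟩ := hBA v i k h
    refine pv_find_eq _ (pvQ (d.map Prod.fst)) (pv_Q_asymm (d.map Prod.fst))
      (pv_S_pairwise (d.map Prod.fst) hpre) _ k
      ((PySem.List.mem_sorted _ _ _ _).mpr (List.mem_map.mpr ⟨(k, v), hkd, rfl⟩))
      (by simpa using hvfk) ?_
    intro k' hk' hp'
    exact hopt k' ((PySem.List.mem_sorted _ _ _ _).mp hk') (by simpa using hp')
  -- facts about the elements of best.values
  have hval_fact : ∀ x ∈ PySem.Dict.values best,
      best.get? (((PySem.Dict.mk d).get? x.2).getD "") = some x ∧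
      x.1 = (((d.map Prod.fst).idxOf x.2 : Nat) : Int) ∧ x.2 ∈ d.map Prod.fst := by
    intro x hx
    obtain ⟨e, he, h2⟩ := List.mem_map.mp hx
    have hg : best.get? e.1 = some e.2 :=
      PySem.Dict.get?_of_mem_items best he hkeysnd
    obtain ⟨hkd, hvfk, hi, -⟩ := hBA e.1 e.2.1 e.2.2 (by rw [hg])
    subst h2
    exact ⟨by rw [hvfk, hg], hi, List.mem_map.mpr ⟨(e.2.2, e.1), hkd, rfl⟩⟩
  -- values of best are Nodup, and so are their keys
  have hvals_nodup : (PySem.Dict.values best).Nodup := by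
    have hitems : best.items.Nodup := List.Nodup.of_map _ hkeysnd
    refine (List.nodup_map_iff_inj_on hitems).mpr ?_
    intro e he e' he' hee
    have hg : best.get? e.1 = some e.2 :=
      PySem.Dict.get?_of_mem_items best he hkeysnd
    have hg' : best.get? e'.1 = some e'.2 :=
      PySem.Dict.get?_of_mem_items best he' hkeysnd
    obtain ⟨-, hvfk, -, -⟩ := hBA e.1 e.2.1 e.2.2 (by rw [hg])
    obtain ⟨-, hvfk', -, -⟩ := hBA e'.1 e'.2.1 e'.2.2 (by rw [hg'])
    have h1 : e.1 = e'.1 := by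
      rw [← hvfk, ← hvfk']
      rw [show e.2.2 = e'.2.2 from by rw [hee]]
    exact Prod.ext h1 hee
  have hwk_nodup : ((PySem.Dict.values best).map (fun ik => ik.2)).Nodup := by
    have hitems : best.items.Nodup := List.Nodup.of_map _ hkeysnd
    rw [PySem.Dict.values, List.map_map]
    refine (List.nodup_map_iff_inj_on hitems).mpr ?_
    intro e he e' he' hee
    simp only [Function.comp] at hee
    have hg : best.get? e.1 = some e.2 :=
      PySem.Dict.get?_of_mem_items best he hkeysnd
    have hg' : best.get? e'.1 = some e'.2 :=
      PySem.Dict.get?_of_mem_items best he' hkeysnd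
    obtain ⟨-, hvfk, hi, -⟩ := hBA e.1 e.2.1 e.2.2 (by rw [hg])
    obtain ⟨-, hvfk', hi', -⟩ := hBA e'.1 e'.2.1 e'.2.2 (by rw [hg'])
    have h1 : e.1 = e'.1 := by
      rw [← hvfk, ← hvfk']
      rw [show e.2.2 = e'.2.2 from hee]
    have h2 : e.2 = e'.2 := by
      rw [h1] at hg
      rw [hg] at hg'
      exact Option.some.inj hg'
    exact Prod.ext h1 h2
  have hwperm : winners.Perm (PySem.Dict.values best) :=
    PySem.List.sorted2_perm _ _ _ _
  have hwin_keys_nodup : (winners.map (fun ik => ik.2)).Nodup :=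
    ((hwperm.map (fun ik => ik.2)).nodup_iff).mpr hwk_nodup
  -- B's output dict is a fold over fresh distinct keys: it is just a map
  rw [PySem.Dict.items_foldl_insert_fresh winners (fun ik => ik.2)
      (fun ik => ((PySem.Dict.mk d).get? ik.2).getD "") PySem.Dict.empty
      (fun a _ => PySem.Dict.contains_empty _) hwin_keys_nodup]
  rw [show (PySem.Dict.empty : PySem.Dict String String).items = [] from rfl,
    List.nil_append]
  -- both sides are maps over key lists; compare them as ordered lists
  unfold pvKeep
  -- permutation of the key lists
  have hmemiff : ∀ k : String,
      k ∈ (PySem.List.sorted (d.map Prod.fst) (fun k => PySem.Str.len k) true).filter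
            (fun k => (PySem.List.sorted (d.map Prod.fst) (fun k => PySem.Str.len k) true).find?
                (fun k' => ((PySem.Dict.mk d).get? k').getD "" == ((PySem.Dict.mk d).get? k).getD "")
              == some k)
        ↔ k ∈ winners.map (fun ik => ik.2) := by
    intro k
    rw [(hwperm.map (fun ik => ik.2)).mem_iff]
    constructor
    · intro hk
      obtain ⟨hkS, hpk⟩ := List.mem_filter.mp hk
      have hpk' := eq_of_beq hpk
      have hkkeys : k ∈ d.map Prod.fst := (PySem.List.mem_sorted _ _ _ _).mp hkS
      obtain ⟨⟨k0, w⟩, hkw, hfst⟩ := List.mem_map.mp hkkeys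
      have hk0 : k0 = k := hfst
      rw [hk0] at hkw
      rcases hgg : best.get? (((PySem.Dict.mk d).get? k).getD "") with _ | ik
      · exfalso
        rw [hget] at hgg
        have hnone := (pv_run_spec _ (PySem.List.enumerate d)
          (PySem.List.pairwise_lt_enumerate d 0)).1 hgg
        have hw : ((PySem.Dict.mk d).get? k).getD "" = w := hval_of_mem k w hkw
        exact hnone _ (hmem_enum k w hkw) (by simpa using hw.symm)
      · have hf := hfind _ ik.1 ik.2 (by rw [hgg])
        have hik2 : ik.2 = k := by
          rw [hpk'] at hf
          exact (Option.some.inj hf).symm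
        exact List.mem_map.mpr ⟨ik, List.mem_map.mpr
          ⟨(((PySem.Dict.mk d).get? k).getD "", ik),
            PySem.Dict.mem_items_of_get?_eq_some _ hgg, rfl⟩, hik2⟩
    · intro hk
      obtain ⟨ik, hikv, hik2⟩ := List.mem_map.mp hk
      obtain ⟨hg, -, hkkeys⟩ := hval_fact ik hikv
      subst hik2
      have hf := hfind _ ik.1 ik.2 hg
      refine List.mem_filter.mpr ⟨(PySem.List.mem_sorted _ _ _ _).mpr hkkeys, ?_⟩
      simpa using hf
  have hkeysperm :
      ((PySem.List.sorted (d.map Prod.fst) (fun k => PySem.Str.len k) true).filter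
          (fun k => (PySem.List.sorted (d.map Prod.fst) (fun k => PySem.Str.len k) true).find?
              (fun k' => ((PySem.Dict.mk d).get? k').getD "" == ((PySem.Dict.mk d).get? k).getD "")
            == some k)).Perm (winners.map (fun ik => ik.2)) :=
    (List.perm_ext_iff_of_nodup (hS.filter _) hwin_keys_nodup).mpr hmemiff
  -- winners are pairwise in the strict A-output order on keys
  have hwin_pw : winners.Pairwise (fun a b => pvQ (d.map Prod.fst) a.2 b.2) := by
    rw [hwin, show PySem.List.sorted2 (PySem.Dict.values best)
        (fun ik => -(PySem.Str.len ik.2)) (fun ik => ik.1) false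
      = (PySem.Dict.values best).foldl
          (fun acc x => PySem.List.insertBy
            (fun a b => decide (-(PySem.Str.len a.2) < -(PySem.Str.len b.2)) ||
              (!decide (-(PySem.Str.len b.2) < -(PySem.Str.len a.2)) && decide (a.1 < b.1)))
            x acc) [] from rfl]
    refine pv_foldl_insertBy_pairwise _ _
      (fun a b c hab hbc => pv_Q_trans (d.map Prod.fst) a.2 b.2 c.2 hab hbc)
      _ [] (by simp) (by simp) ?_
    have hne := hvals_nodup
    rw [List.nodup_iff_pairwise_ne] at hne
    refine hne.imp_of_mem ?_
    intro a b ha hb hab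
    obtain ⟨-, hia, hak⟩ := hval_fact a ha
    obtain ⟨-, hib, hbk⟩ := hval_fact b hb
    have hne2 : a.2 ≠ b.2 := by
      intro h2
      exact hab (Prod.ext (by rw [hia, hib, h2]) h2)
    have hneidx : (d.map Prod.fst).idxOf a.2 ≠ (d.map Prod.fst).idxOf b.2 :=
      fun he => hne2 (hinj a.2 b.2 hak hbk he)
    constructor
    · intro hP
      simp only [Bool.or_eq_true, Bool.and_eq_true, Bool.not_eq_true',
        decide_eq_true_eq, decide_eq_false_iff_not] at hP
      unfold pvQ
      rw [hia, hib] at hP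
      omega
    · intro hP
      simp only [Bool.or_eq_false_iff, Bool.and_eq_false_iff, Bool.not_eq_false',
        decide_eq_false_iff_not, decide_eq_true_eq] at hP
      unfold pvQ
      rw [hia, hib] at hP
      omega
  -- conclude: same members, both strictly ordered by pvQ on the key component
  refine List.Perm.eq_of_pairwise
    (le := fun p q : String × String => pvQ (d.map Prod.fst) p.1 q.1)
    (fun a b _ _ h1 h2 => (pv_Q_asymm (d.map Prod.fst) a.1 b.1 h1 h2).elim)
    ?_ ?_ ?_
  · refine List.pairwise_map.mpr ?_
    exact List.Pairwise.filter _ (pv_S_pairwise (d.map Prod.fst) hpre)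
  · refine List.pairwise_map.mpr ?_
    exact hwin_pw
  · rw [show winners.map (fun ik => (ik.2, ((PySem.Dict.mk d).get? ik.2).getD ""))
        = (winners.map (fun ik => ik.2)).map
            (fun k => (k, ((PySem.Dict.mk d).get? k).getD "")) from by
      rw [List.map_map]; rfl]
    exact hkeysperm.map _
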